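-- pv_equiv track=rewrite | github.com/ductuantruong/ps_baseline | inference.py | print_spoof_timestamps
-- ===== SOURCE A (Python) =====
-- def print_spoof_timestamps(pred, rso=20):
--     start = None
--     txt_output = []
--     for i, value in enumerate(pred):
--         if value == 0:
--             if start is None:
--                 start = i * rso
--         else:
--             if start is not None:
--                 end = i * rso
--                 txt_output.append(f"{start}ms - {end}ms")
--                 start = None
--
--     # Check if the list ends with 0
--     if start is not None:
--         end = len(pred) * rso
--         txt_output.append(f"{start}ms - {end}ms")
--     return txt_output
-- ===== SOURCE B (Python) =====
-- def print_spoof_timestamps(pred, rso=20):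
--     # Stateless boundary detection: zero-run starts are the nonzero->zero
--     # transitions of a sentinel-prefixed shift, zero-run ends the zero->nonzero
--     # transitions with a trailing nonzero sentinel (so a final run closes at
--     # len(pred)); pairing starts with ends gives the intervals.
--     p = list(pred)
--     starts = [i for i, (a, b) in enumerate(zip([1] + p, p)) if a != 0 and b == 0]
--     ends = [i + 1 for i, (a, b) in enumerate(zip(p, p[1:] + [1])) if a == 0 and b != 0]
--     return [f"{s * rso}ms - {e * rso}ms" for s, e in zip(starts, ends)]
-- ===== Notes on version B (the rewrite author's own statement) =====
-- stated objective: alternative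
-- what changed: Replaces A's open-start sentinel state machine (with its post-loop trailing-zero flush) by stateless transition detection: zips the sequence with shifted, sentinel-padded copies of itself to read off all run starts and all run ends as independent lists, then pairs them with zip.
import Mathlib
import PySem

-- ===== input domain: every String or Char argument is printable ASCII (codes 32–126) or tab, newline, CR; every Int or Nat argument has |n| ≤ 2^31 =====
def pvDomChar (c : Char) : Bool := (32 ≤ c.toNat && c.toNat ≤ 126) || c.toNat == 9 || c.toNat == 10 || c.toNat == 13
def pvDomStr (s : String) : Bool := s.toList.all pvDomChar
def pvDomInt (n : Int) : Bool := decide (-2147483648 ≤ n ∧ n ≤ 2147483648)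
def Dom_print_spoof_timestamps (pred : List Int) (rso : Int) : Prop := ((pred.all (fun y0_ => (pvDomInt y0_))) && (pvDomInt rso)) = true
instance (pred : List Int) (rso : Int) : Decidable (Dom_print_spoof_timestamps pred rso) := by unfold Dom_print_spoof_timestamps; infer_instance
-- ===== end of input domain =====

-- B replaces A's open-start sentinel state machine (with its post-loop trailing-zero flush)
-- by stateless transition detection over sentinel-padded shifted zips (objective: alternative).

-- ===== PORT A =====
-- f"{start}ms - {end}ms"
def fmtA (s e : Int) : String := PySem.Int.toStr s ++ "ms - " ++ PySem.Int.toStr e ++ "ms"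

-- A's loop body; state = (start, txt_output)
def stepA (rso : Int) (st : Option Int × List String) (iv : Int × Int) : Option Int × List String :=
  if iv.2 = 0 then
    match st.1 with
    | none => (some (iv.1 * rso), st.2)
    | some _ => st
  else
    match st.1 with
    | some s => (none, st.2 ++ [fmtA s (iv.1 * rso)])
    | none => st

def print_spoof_timestamps (pred : List Int) (rso : Int) : List String :=
  let r := (PySem.List.enumerate pred).foldl (stepA rso) (none, [])
  match r.1 with
  | some s => r.2 ++ [fmtA s ((pred.length : Int) * rso)]
  | none => r.2

-- ===== PORT B =====
def print_spoof_timestamps_alt (pred : List Int) (rso : Int) : List String :=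
  let starts := ((PySem.List.enumerate (((1:Int) :: pred).zip pred)).filter
      (fun x => x.2.1 != 0 && x.2.2 == 0)).map (fun x => x.1)
  let ends := ((PySem.List.enumerate (pred.zip (pred.drop 1 ++ [(1:Int)]))).filter
      (fun x => x.2.1 == 0 && x.2.2 != 0)).map (fun x => x.1 + 1)
  (starts.zip ends).map (fun se => PySem.Int.toStr (se.1 * rso) ++ "ms - " ++ PySem.Int.toStr (se.2 * rso) ++ "ms")

-- ===== PRECONDITION & SPEC =====
def Spec_print_spoof_timestamps (pred : List Int) (rso : Int) (out : List String) : Prop := out = print_spoof_timestamps_alt pred rso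
instance (pred : List Int) (rso : Int) (out : List String) : Decidable (Spec_print_spoof_timestamps pred rso out) := by unfold Spec_print_spoof_timestamps; infer_instance

-- ===== CLAIM (what is proved, stated in full; the proofs are below) =====
def Claim_equal_print_spoof_timestamps : Prop := ∀ (pred : List Int) (rso : Int), Dom_print_spoof_timestamps pred rso → Spec_print_spoof_timestamps pred rso (print_spoof_timestamps pred rso)

-- ===== LEMMAS AND PROOFS =====

-- A's post-loop flush, with e the final end index
def finA (rso e : Int) (st : Option Int × List String) : List String :=
  match st.1 with
  | some s => st.2 ++ [fmtA s (e * rso)]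
  | none => st.2

-- zero-run start indices of l at offset k, the element before l being prev
def startsAux (prev : Int) (l : List Int) (k : Int) : List Int :=
  match l with
  | [] => []
  | x :: t => (if prev ≠ 0 ∧ x = 0 then [k] else []) ++ startsAux x t (k + 1)

-- zero-run end indices of l at offset k (trailing run closes at k + len l)
def endsAux (l : List Int) (k : Int) : List Int :=
  match l with
  | [] => []
  | x :: t => (if x = 0 ∧ t.headD 1 ≠ 0 then [k + 1] else []) ++ endsAux t (k + 1)

def fmtZip (rso : Int) (ss es : List Int) : List String :=
  (ss.zip es).map (fun se => PySem.Int.toStr (se.1 * rso) ++ "ms - " ++ PySem.Int.toStr (se.2 * rso) ++ "ms")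

-- main invariant: A's fold-and-flush equals the formatted zip of start/end boundary lists
theorem psf_main (rso : Int) (l : List Int) : ∀ (k : Int) (acc : List String),
    (∀ prev : Int, prev ≠ 0 →
      finA rso (k + l.length) ((PySem.List.enumerate l k).foldl (stepA rso) (none, acc))
        = acc ++ fmtZip rso (startsAux prev l k) (endsAux l k))
  ∧ (∀ s0 : Int,
      finA rso (k + l.length) ((PySem.List.enumerate l k).foldl (stepA rso) (some (s0 * rso), acc))
        = acc ++ fmtZip rso (s0 :: startsAux 0 l k)
            ((if l.headD 1 ≠ 0 then [k] else []) ++ endsAux l k)) := by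
  induction l with
  | nil =>
    intro k acc
    constructor
    · intro prev _
      simp [PySem.List.enumerate_nil, finA, startsAux, endsAux, fmtZip]
    · intro s0
      simp [PySem.List.enumerate_nil, finA, startsAux, endsAux, fmtZip, fmtA]
  | cons x t IH =>
    intro k acc
    constructor
    · intro prev hprev
      rw [PySem.List.enumerate_cons]
      simp only [List.foldl_cons]
      by_cases hx : x = 0
      · have hA : stepA rso (none, acc) (k, x) = (some (k * rso), acc) := by
          simp [stepA, hx]
        rw [hA]
        have h2 := (IH (k + 1) acc).2 k
        rw [show k + (x :: t).length = (k + 1) + t.length by simp; omega]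
        rw [h2]
        simp [startsAux, endsAux, hx, hprev]
      · have hA : stepA rso (none, acc) (k, x) = (none, acc) := by
          simp [stepA, hx]
        rw [hA]
        have h1 := (IH (k + 1) acc).1 x hx
        rw [show k + (x :: t).length = (k + 1) + t.length by simp; omega]
        rw [h1]
        simp [startsAux, endsAux, hx, hprev]
    · intro s0
      rw [PySem.List.enumerate_cons]
      simp only [List.foldl_cons]
      by_cases hx : x = 0
      · have hA : stepA rso (some (s0 * rso), acc) (k, x) = (some (s0 * rso), acc) := by
          simp [stepA, hx]
        rw [hA]
        have h2 := (IH (k + 1) acc).2 s0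
        rw [show k + (x :: t).length = (k + 1) + t.length by simp; omega]
        rw [h2]
        simp [startsAux, endsAux, hx]
      · have hA : stepA rso (some (s0 * rso), acc) (k, x)
            = (none, acc ++ [fmtA (s0 * rso) (k * rso)]) := by
          simp [stepA, hx]
        rw [hA]
        have h1 := (IH (k + 1) (acc ++ [fmtA (s0 * rso) (k * rso)])).1 x hx
        rw [show k + (x :: t).length = (k + 1) + t.length by simp; omega]
        rw [h1]
        simp [startsAux, endsAux, hx, fmtZip, fmtA]

-- B's starts comprehension computes startsAux
theorem psf_starts (l : List Int) : ∀ (prev k : Int),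
    (((PySem.List.enumerate ((prev :: l).zip l) k).filter
        (fun x => x.2.1 != 0 && x.2.2 == 0)).map (fun x => x.1))
      = startsAux prev l k := by
  induction l with
  | nil => intro prev k; simp [PySem.List.enumerate_nil, startsAux]
  | cons x t IH =>
    intro prev k
    have hz : (prev :: x :: t).zip (x :: t) = (prev, x) :: ((x :: t).zip t) := rfl
    rw [hz, PySem.List.enumerate_cons]
    simp only [List.filter_cons, startsAux]
    by_cases h : prev ≠ 0 ∧ x = 0
    · simp [h.1, h.2]
      exact IH 0 (k + 1)
    · rcases Decidable.not_and_iff_not_or_not.mp h with h1 | h2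
      · simp at h1
        simp [h1]
        exact IH x (k + 1)
      · simp [h2]
        exact IH x (k + 1)

-- shifted zip with trailing sentinel unfolds one step
theorem zip_shift (x : Int) (t : List Int) :
    (x :: t).zip (t ++ [(1:Int)]) = (x, t.headD 1) :: t.zip (t.drop 1 ++ [(1:Int)]) := by
  cases t <;> rfl

-- B's ends comprehension computes endsAux
theorem psf_ends (l : List Int) : ∀ (k : Int),
    (((PySem.List.enumerate (l.zip (l.drop 1 ++ [(1:Int)])) k).filter
        (fun x => x.2.1 == 0 && x.2.2 != 0)).map (fun x => x.1 + 1))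
      = endsAux l k := by
  induction l with
  | nil => intro k; simp [PySem.List.enumerate_nil, endsAux]
  | cons x t IH =>
    intro k
    have IH' := IH (k + 1)
    simp only [List.drop_one] at IH'
    rw [show (x :: t).drop 1 = t from rfl, zip_shift, PySem.List.enumerate_cons]
    simp only [List.filter_cons, endsAux, List.headD_eq_head?_getD]
    by_cases h : x = 0 ∧ t.head?.getD 1 ≠ 0
    · simp [h.1, h.2, IH']
    · rcases Decidable.not_and_iff_not_or_not.mp h with h1 | h2
      · simp [h1, IH']
      · simp at h2
        simp [h2, IH']

-- ===== VERDICT (by name: the statement is the Claim_ definition above) =====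
theorem print_spoof_timestamps_spec : Claim_equal_print_spoof_timestamps := by
  intro pred rso _
  unfold Spec_print_spoof_timestamps
  have hA : print_spoof_timestamps pred rso
      = finA rso ((pred.length : Int)) ((PySem.List.enumerate pred).foldl (stepA rso) (none, [])) := by
    simp [print_spoof_timestamps, finA]
  have hmain := (psf_main rso pred 0 []).1 1 (by norm_num)
  simp only [zero_add, List.nil_append] at hA hmain
  rw [hA, hmain]
  simp only [print_spoof_timestamps_alt]
  rw [psf_starts pred 1 0, psf_ends pred 0]
  simp [fmtZip]
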